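-- pv_equiv track=rewrite | github.com/exzellerate/listing-agent-mvp | backend/fix_braces_remaining.py | escape_braces_in_range
-- ===== SOURCE A (Python) =====
-- def escape_braces_in_range(lines, start_line, end_line):
--     """Escape curly braces in specified line range (1-indexed)."""
--     for i in range(start_line - 1, min(end_line, len(lines))):
--         line = lines[i]
--
--         # Skip lines that are already escaped (contain {{ or }})
--         if '{{' in line or '}}' in line:
--             continue
--
--         # Preserve already-doubled braces
--         line = line.replace('{{', '\x00DOUBLE_OPEN\x00')
--         line = line.replace('}}', '\x00DOUBLE_CLOSE\x00')
--
--         # Escape single braces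
--         line = line.replace('{', '{{')
--         line = line.replace('}', '}}')
--
--         # Restore doubled braces as quadrupled
--         line = line.replace('\x00DOUBLE_OPEN\x00', '{{{{')
--         line = line.replace('\x00DOUBLE_CLOSE\x00', '}}}}')
--
--         lines[i] = line
--
--     return lines
-- ===== SOURCE B (Python) =====
-- def escape_braces_in_range(lines, start_line, end_line):
--     """Escape curly braces in specified line range (1-indexed)."""
--     for i in range(start_line - 1, min(end_line, len(lines))):
--         line = lines[i]
--         # Skip lines that are already escaped (contain {{ or }})
--         if '{{' in line or '}}' in line:
--             continue
--         out = []
--         for ch in line: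
--             if ch == '{':
--                 out.append('{{')
--             elif ch == '}':
--                 out.append('}}')
--             else:
--                 out.append(ch)
--         lines[i] = ''.join(out)
--     return lines
-- ===== Notes on version B (the rewrite author's own statement) =====
-- stated objective: simpler
-- what changed: The six chained str.replace passes (including the dead NUL-sentinel preserve/restore logic) are replaced by a single left-to-right character scan that emits '{{' for '{', '}}' for '}', and the char otherwise; the outer loop, skip guard, in-place mutation and return value are unchanged.
import Mathlib
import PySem

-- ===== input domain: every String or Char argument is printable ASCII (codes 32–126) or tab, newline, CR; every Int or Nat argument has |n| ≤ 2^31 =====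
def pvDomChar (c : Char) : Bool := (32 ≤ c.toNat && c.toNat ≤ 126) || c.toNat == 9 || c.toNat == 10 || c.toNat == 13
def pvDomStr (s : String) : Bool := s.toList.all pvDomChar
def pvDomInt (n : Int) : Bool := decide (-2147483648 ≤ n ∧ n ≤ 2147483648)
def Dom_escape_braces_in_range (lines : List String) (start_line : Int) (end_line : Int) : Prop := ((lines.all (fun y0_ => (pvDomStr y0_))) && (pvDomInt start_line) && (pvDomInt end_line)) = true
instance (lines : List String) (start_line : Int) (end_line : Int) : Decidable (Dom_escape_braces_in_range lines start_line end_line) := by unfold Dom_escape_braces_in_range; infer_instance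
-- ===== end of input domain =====

-- B replaces A's six chained str.replace passes (with their dead NUL-sentinel logic) by one
-- left-to-right character scan per line; both mutate the list in place (return value proved equal).

-- ===== PORT A =====
def escape_braces_in_range (lines : List String) (start_line : Int) (end_line : Int) : List String :=
  (PySem.List.pyRange (start_line - 1) (min end_line (lines.length : Int)) 1).foldl
    (fun acc i =>
      let line := PySem.List.pyGetD acc i ""
      if PySem.Str.isIn "{{" line || PySem.Str.isIn "}}" line then acc
      else
        let line1 := PySem.Str.replace line "{{" "\x00DOUBLE_OPEN\x00"
        let line2 := PySem.Str.replace line1 "}}" "\x00DOUBLE_CLOSE\x00"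
        let line3 := PySem.Str.replace line2 "{" "{{"
        let line4 := PySem.Str.replace line3 "}" "}}"
        let line5 := PySem.Str.replace line4 "\x00DOUBLE_OPEN\x00" "{{{{"
        let line6 := PySem.Str.replace line5 "\x00DOUBLE_CLOSE\x00" "}}}}"
        PySem.List.pySetD acc i line6)
    lines

-- ===== PORT B =====
-- the inner character scan of Source B: out = []; for ch in line: append …; ''.join(out)
def escScan (cs : List Char) : List Char :=
  cs.foldl (fun out ch =>
    if ch = '{' then out ++ ['{', '{']
    else if ch = '}' then out ++ ['}', '}']
    else out ++ [ch]) []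

def escape_braces_in_range_alt (lines : List String) (start_line : Int) (end_line : Int) : List String :=
  (PySem.List.pyRange (start_line - 1) (min end_line (lines.length : Int)) 1).foldl
    (fun acc i =>
      let line := PySem.List.pyGetD acc i ""
      if PySem.Str.isIn "{{" line || PySem.Str.isIn "}}" line then acc
      else PySem.List.pySetD acc i (String.ofList (escScan line.toList)))
    lines

-- ===== PRECONDITION & SPEC =====
-- Pre_ excludes exactly the inputs where A raises IndexError: a nonempty range whose first
-- index start_line - 1 wraps below -len(lines).
def Pre_escape_braces_in_range (lines : List String) (start_line : Int) (end_line : Int) : Prop :=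
  min end_line (lines.length : Int) ≤ start_line - 1 ∨ -(lines.length : Int) ≤ start_line - 1
instance (lines : List String) (start_line : Int) (end_line : Int) : Decidable (Pre_escape_braces_in_range lines start_line end_line) := by unfold Pre_escape_braces_in_range; infer_instance

def pvWitness_escape_braces_in_range : List String × Int × Int := (["a{b", "c}d", "e{{f"], 1, 3)

def Spec_escape_braces_in_range (lines : List String) (start_line : Int) (end_line : Int) (out : List String) : Prop := out = escape_braces_in_range_alt lines start_line end_line
instance (lines : List String) (start_line : Int) (end_line : Int) (out : List String) : Decidable (Spec_escape_braces_in_range lines start_line end_line out) := by unfold Spec_escape_braces_in_range; infer_instance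

-- ===== CLAIM (what is proved, stated in full; the proofs are below) =====
def Claim_equal_escape_braces_in_range : Prop := ∀ (lines : List String) (start_line : Int) (end_line : Int), Dom_escape_braces_in_range lines start_line end_line → Pre_escape_braces_in_range lines start_line end_line → Spec_escape_braces_in_range lines start_line end_line (escape_braces_in_range lines start_line end_line)

-- ===== LEMMAS AND PROOFS =====

-- character-wise escaping, the common value of both per-line transformations
def escOne (c : Char) : List Char :=
  if c = '{' then ['{', '{'] else if c = '}' then ['}', '}'] else [c]

theorem escScan_eq_flatMap (cs : List Char) : escScan cs = cs.flatMap escOne := by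
  have hf : (fun (out : List Char) ch =>
      if ch = '{' then out ++ ['{', '{']
      else if ch = '}' then out ++ ['}', '}']
      else out ++ [ch]) = (fun out ch => out ++ escOne ch) := by
    funext out ch
    unfold escOne
    split_ifs <;> rfl
  rw [escScan, hf, PySem.List.foldl_append_eq_flatMap]
  rfl

theorem go_of_not_infix (old new : List Char) :
    ∀ (fuel : Nat) (l acc : List Char), ¬ old <:+: l →
      PySem.Chars.replace.go old new fuel l acc = acc.reverse ++ l := by
  intro fuel
  induction fuel with
  | zero => intro l acc _; rfl
  | succ f ih =>
    intro l acc h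
    cases l with
    | nil => simp [PySem.Chars.replace.go]
    | cons c t =>
      have hpre : old.isPrefixOf (c :: t) = false := by
        rw [Bool.eq_false_iff, ne_eq, List.isPrefixOf_iff_prefix]
        exact fun hp => h hp.isInfix
      have ht : ¬ old <:+: t := fun hi => h (hi.trans (List.suffix_cons c t).isInfix)
      simp only [PySem.Chars.replace.go, hpre]
      rw [ih t (c :: acc) ht]
      simp

theorem replace_of_not_infix (old new l : List Char) (hne : old ≠ []) (h : ¬ old <:+: l) :
    PySem.Chars.replace l old new = l := by
  unfold PySem.Chars.replace
  rw [if_neg (by simpa [List.isEmpty_iff] using hne)]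
  simpa using go_of_not_infix old new l.length l [] h

theorem go_single (a : Char) (new : List Char) :
    ∀ (fuel : Nat) (l acc : List Char), l.length ≤ fuel →
      PySem.Chars.replace.go [a] new fuel l acc
        = acc.reverse ++ l.flatMap (fun c => if c = a then new else [c]) := by
  intro fuel
  induction fuel with
  | zero =>
    intro l acc h
    have : l = [] := List.eq_nil_of_length_eq_zero (Nat.le_zero.mp h)
    subst this; rfl
  | succ f ih =>
    intro l acc h
    cases l with
    | nil => simp [PySem.Chars.replace.go]
    | cons c t =>
      simp only [List.length_cons, Nat.succ_le_succ_iff] at h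
      by_cases hc : c = a
      · subst hc
        have hpre : [c].isPrefixOf (c :: t) = true := by
          rw [List.isPrefixOf_iff_prefix]
          exact ⟨t, rfl⟩
        simp only [PySem.Chars.replace.go, hpre]
        rw [List.length_singleton, List.drop_one, List.tail_cons, ih t (new.reverse ++ acc) h]
        simp
      · have hpre : [a].isPrefixOf (c :: t) = false := by
          rw [Bool.eq_false_iff, ne_eq, List.isPrefixOf_iff_prefix]
          intro hp
          exact hc (List.cons_prefix_cons.mp hp).1.symm
        simp only [PySem.Chars.replace.go, hpre]
        rw [ih t (c :: acc) h]
        simp [hc]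

theorem replace_single (a : Char) (new l : List Char) :
    PySem.Chars.replace l [a] new = l.flatMap (fun c => if c = a then new else [c]) := by
  unfold PySem.Chars.replace
  rw [if_neg (by simp)]
  simpa using go_single a new l.length l [] (le_refl _)

-- no NUL character occurs in the string
def NoNul (cs : List Char) : Prop := '\x00' ∉ cs

theorem not_infix_of_noNul (cs sent : List Char) (hh : '\x00' ∈ sent) (h : NoNul cs) :
    ¬ sent <:+: cs := fun hi => h (hi.subset hh)

theorem noNul_flatMap_escOne (cs : List Char) (h : NoNul cs) : NoNul (cs.flatMap escOne) := by
  intro hm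
  rcases List.mem_flatMap.mp hm with ⟨c, hc, hm⟩
  unfold escOne at hm
  split_ifs at hm
  · exact absurd hm (by decide)
  · exact absurd hm (by decide)
  · simp only [List.mem_singleton] at hm
    exact h (hm ▸ hc)

theorem line_eq (line : String) (hN : NoNul line.toList)
    (h1 : PySem.Str.isIn "{{" line = false) (h2 : PySem.Str.isIn "}}" line = false) :
    PySem.Str.replace
      (PySem.Str.replace
        (PySem.Str.replace
          (PySem.Str.replace
            (PySem.Str.replace
              (PySem.Str.replace line "{{" "\x00DOUBLE_OPEN\x00")
              "}}" "\x00DOUBLE_CLOSE\x00")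
            "{" "{{")
          "}" "}}")
        "\x00DOUBLE_OPEN\x00" "{{{{")
      "\x00DOUBLE_CLOSE\x00" "}}}}"
    = String.ofList (escScan line.toList) := by
  have hinf1 : ¬ ("{{" : String).toList <:+: line.toList := fun hc =>
    absurd ((PySem.Str.isIn_iff_infix "{{" line).mpr hc) (Bool.eq_false_iff.mp h1)
  have hinf2 : ¬ ("}}" : String).toList <:+: line.toList := fun hc =>
    absurd ((PySem.Str.isIn_iff_infix "}}" line).mpr hc) (Bool.eq_false_iff.mp h2)
  apply String.toList_inj.mp
  simp only [PySem.Str.toList_replace]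
  rw [replace_of_not_infix _ _ _ (by decide) hinf1]
  rw [replace_of_not_infix _ _ _ (by decide) hinf2]
  have h3 : PySem.Chars.replace line.toList ("{" : String).toList ("{{" : String).toList
      = line.toList.flatMap (fun c => if c = '{' then ['{','{'] else [c]) := replace_single _ _ _
  rw [h3, show ("}" : String).toList = ['}'] from rfl, replace_single]
  rw [List.flatMap_assoc]
  simp only [show ("}}" : String).toList = ['}','}'] from rfl]
  have hfe : (fun x : Char => List.flatMap (fun c => if c = '}' then ['}','}'] else [c])
      (if x = '{' then ['{','{'] else [x])) = escOne := by
    funext c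
    unfold escOne
    by_cases hc1 : c = '{' <;> by_cases hc2 : c = '}' <;> simp_all
  rw [hfe]
  have hNe : NoNul (line.toList.flatMap escOne) := noNul_flatMap_escOne _ hN
  rw [replace_of_not_infix _ _ _ (by decide) (not_infix_of_noNul _ _ (by decide) hNe)]
  rw [replace_of_not_infix _ _ _ (by decide) (not_infix_of_noNul _ _ (by decide) hNe)]
  simp [escScan_eq_flatMap]

theorem noNul_pySetD (acc : List String) (i : Int) (v : String)
    (hacc : ∀ s ∈ acc, NoNul s.toList) (hv : NoNul v.toList) :
    ∀ s ∈ PySem.List.pySetD acc i v, NoNul s.toList := by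
  intro s hs
  unfold PySem.List.pySetD PySem.List.pySet? at hs
  cases hk : PySem.List.pyIdx? acc.length i with
  | none => rw [hk] at hs; exact hacc s hs
  | some k =>
    rw [hk] at hs
    simp only [Option.map_some, Option.getD_some] at hs
    rcases List.mem_or_eq_of_mem_set hs with h | h
    · exact hacc s h
    · subst h; exact hv

-- proof-side names for the two per-step bodies (definitionally the ports' lambdas)
def stepA (acc : List String) (i : Int) : List String :=
  let line := PySem.List.pyGetD acc i ""
  if PySem.Str.isIn "{{" line || PySem.Str.isIn "}}" line then acc
  else
    let line1 := PySem.Str.replace line "{{" "\x00DOUBLE_OPEN\x00"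
    let line2 := PySem.Str.replace line1 "}}" "\x00DOUBLE_CLOSE\x00"
    let line3 := PySem.Str.replace line2 "{" "{{"
    let line4 := PySem.Str.replace line3 "}" "}}"
    let line5 := PySem.Str.replace line4 "\x00DOUBLE_OPEN\x00" "{{{{"
    let line6 := PySem.Str.replace line5 "\x00DOUBLE_CLOSE\x00" "}}}}"
    PySem.List.pySetD acc i line6

def stepB (acc : List String) (i : Int) : List String :=
  let line := PySem.List.pyGetD acc i ""
  if PySem.Str.isIn "{{" line || PySem.Str.isIn "}}" line then acc
  else PySem.List.pySetD acc i (String.ofList (escScan line.toList))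

theorem noNul_pyGetD (acc : List String) (i : Int) (hacc : ∀ s ∈ acc, NoNul s.toList) :
    NoNul (PySem.List.pyGetD acc i "").toList := by
  by_cases hi : PySem.Raise.InRange acc.length i
  · exact hacc _ (PySem.List.pyGetD_mem acc "" hi)
  · rw [PySem.List.pyGetD_of_none acc i "" ((PySem.List.pyGet?_eq_none_iff acc i).mpr hi)]
    intro hm
    simp at hm

theorem stepA_eq_stepB (acc : List String) (i : Int) (hacc : ∀ s ∈ acc, NoNul s.toList) :
    stepA acc i = stepB acc i := by
  by_cases hg : (PySem.Str.isIn "{{" (PySem.List.pyGetD acc i "")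
      || PySem.Str.isIn "}}" (PySem.List.pyGetD acc i "")) = true
  · simp only [stepA, stepB, if_pos hg]
  · rcases Bool.or_eq_false_iff.mp (Bool.eq_false_iff.mpr hg) with ⟨h1, h2⟩
    simp only [stepA, stepB, if_neg hg]
    rw [line_eq _ (noNul_pyGetD acc i hacc) h1 h2]

theorem noNul_stepB (acc : List String) (i : Int) (hacc : ∀ s ∈ acc, NoNul s.toList) :
    ∀ s ∈ stepB acc i, NoNul s.toList := by
  simp only [stepB]
  split
  · exact hacc
  · apply noNul_pySetD _ _ _ hacc
    rw [escScan_eq_flatMap]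
    simp only [String.toList_ofList]
    exact noNul_flatMap_escOne _ (noNul_pyGetD acc i hacc)

theorem foldl_eq (r : List Int) :
    ∀ (acc : List String), (∀ s ∈ acc, NoNul s.toList) →
      r.foldl stepA acc = r.foldl stepB acc := by
  induction r with
  | nil => intro acc _; simp only [List.foldl_nil]
  | cons i r ih =>
    intro acc hacc
    simp only [List.foldl_cons]
    rw [stepA_eq_stepB acc i hacc]
    exact ih _ (noNul_stepB acc i hacc)

-- ===== VERDICT (by name: the statement is the Claim_ definition above) =====
theorem escape_braces_in_range_spec : Claim_equal_escape_braces_in_range := by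
  intro lines start_line end_line hDom _hPre
  unfold Spec_escape_braces_in_range
  show (PySem.List.pyRange (start_line - 1) (min end_line (lines.length : Int)) 1).foldl stepA lines
      = (PySem.List.pyRange (start_line - 1) (min end_line (lines.length : Int)) 1).foldl stepB lines
  apply foldl_eq
  intro s hs
  unfold Dom_escape_braces_in_range at hDom
  simp only [Bool.and_eq_true, List.all_eq_true] at hDom
  have hd := hDom.1.1 s hs
  intro hmem
  have := List.all_eq_true.mp hd '\x00' hmem
  simp [pvDomChar] at this
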